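-- pv_equiv track=rewrite | github.com/pyccel/pyccel | tests/epyccel/modules/openmp.py | directive_in_else
-- ===== SOURCE A (Python) =====
-- def directive_in_else(x : int):
--     func_result = 0
--     if x < 30:
--         return x
--     else:
--         #$ omp parallel
--         #$ omp for reduction(+:func_result)
--         for i in range(x):
--             func_result = func_result + i
--         #$ omp end parallel
--
--     return func_result
-- ===== SOURCE B (Python) =====
-- def directive_in_else(x : int):
--     if x < 30:
--         return x
--     return x * (x - 1) // 2
-- ===== Notes on version B (the rewrite author's own statement) =====
-- stated objective: faster
-- what changed: Replaces the O(x) summation loop over range(x) with the closed-form triangular-number formula x*(x-1)//2.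
import Mathlib
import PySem

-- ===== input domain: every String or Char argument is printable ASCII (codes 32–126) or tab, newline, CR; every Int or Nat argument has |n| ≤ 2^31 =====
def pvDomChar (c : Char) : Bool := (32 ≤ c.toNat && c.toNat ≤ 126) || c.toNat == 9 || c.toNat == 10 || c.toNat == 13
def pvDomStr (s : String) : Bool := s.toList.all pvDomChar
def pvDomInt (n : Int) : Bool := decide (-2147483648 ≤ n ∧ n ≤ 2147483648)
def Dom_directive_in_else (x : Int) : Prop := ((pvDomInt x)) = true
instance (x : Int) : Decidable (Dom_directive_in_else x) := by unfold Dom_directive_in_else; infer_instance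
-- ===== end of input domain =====

-- B replaces A's O(x) summation loop with the closed-form triangular sum x*(x-1)//2 (faster).

-- ===== PORT A =====
def directive_in_else (x : Int) : Int :=
  let func_result : Int := 0
  if x < 30 then x
  else (PySem.List.pyRange 0 x 1).foldl (fun acc i => acc + i) func_result

-- ===== PORT B =====
def directive_in_else_alt (x : Int) : Int :=
  if x < 30 then x
  else PySem.Int.floordiv (x * (x - 1)) 2

-- ===== PRECONDITION & SPEC =====
def Spec_directive_in_else (x : Int) (out : Int) : Prop := out = directive_in_else_alt x
instance (x : Int) (out : Int) : Decidable (Spec_directive_in_else x out) := by unfold Spec_directive_in_else; infer_instance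

-- ===== CLAIM (what is proved, stated in full; the proofs are below) =====
def Claim_equal_directive_in_else : Prop := ∀ (x : Int), Dom_directive_in_else x → Spec_directive_in_else x (directive_in_else x)

-- ===== LEMMAS AND PROOFS =====

theorem pv_sum_pyRange (b : Int) (hb : 0 ≤ b) :
    (PySem.List.pyRange 0 b 1).foldl (fun acc i => acc + i) 0 = b * (b - 1) / 2 := by
  obtain ⟨n, rfl⟩ := Int.eq_ofNat_of_zero_le hb
  induction n with
  | zero => simp
  | succ k ih =>
    have h : ((k : Int) : Int) ≤ ((k : Int) + 1) := by omega
    have hstep : PySem.List.pyRange 0 ((k : Int) + 1) 1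
        = PySem.List.pyRange 0 (k : Int) 1 ++ [(k : Int)] :=
      PySem.List.pyRange_one_succ_right (by positivity)
    push_cast
    rw [hstep, List.foldl_append, ih (by positivity)]
    simp only [List.foldl_cons, List.foldl_nil]
    have h2 : ((k : Int) * ((k : Int) - 1)) % 2 = 0 := by
      rcases Int.even_or_odd (k : Int) with ⟨m, hm⟩ | ⟨m, hm⟩ <;> rw [hm] <;> ring_nf <;> omega
    have h3 : (((k : Int) + 1) * ((k : Int) + 1 - 1)) % 2 = 0 := by
      rcases Int.even_or_odd (k : Int) with ⟨m, hm⟩ | ⟨m, hm⟩ <;> rw [hm] <;> ring_nf <;> omega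
    have h4 : ((k:Int)+1)*((k:Int)+1-1) = (k:Int)*((k:Int)-1) + 2*(k:Int) := by ring
    omega

-- ===== VERDICT (by name: the statement is the Claim_ definition above) =====
theorem directive_in_else_spec : Claim_equal_directive_in_else := by
  intro x _
  unfold Spec_directive_in_else directive_in_else directive_in_else_alt
  by_cases h : x < 30
  · simp [h]
  · simp only [h, if_false]
    rw [pv_sum_pyRange x (by omega), PySem.Int.floordiv_eq_ediv_of_pos (by norm_num)]
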